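-- pv_equiv track=rewrite | github.com/DTopping256/OT | modules/utilities.py | n_dim_spiral
-- ===== SOURCE A (Python) =====
-- def n_dim_spiral(cx, max_i, step_size):
--     i = 0
--     # Amount of times the algorithm has reached either an all positive or an all negative areas of n dimentional space.
--     turns = 0
--     start_points = [{k: v for k, v in cx.items()}]
--     while True:
--         for k in cx.keys():
--             for step in range(turns+1):
--                 step = step_size
--                 if (turns % 2 == 1):
--                     step = -step
--                 cx[k] += step
--                 i += 1
--                 # Remove pointers to previous answer from start_points array.
--                 outputDict = {k: v for k, v in cx.items()}
--                 start_points.append(outputDict)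
--                 if (max_i == i):
--                     break
--             if (max_i  == i):
--                 break
--         if (max_i == i):
--             break
--         turns += 1
--     return start_points
-- ===== SOURCE B (Python) =====
-- def n_dim_spiral(cx, max_i, step_size):
--     # Two-phase rewrite: precompute the flat (key, delta) schedule turn by turn,
--     # truncate it to max_i updates, then apply it in one plain pass.
--     keys = list(cx)
--     deltas = []
--     turns = 0
--     while len(deltas) < max_i:
--         sign = -step_size if turns % 2 == 1 else step_size
--         deltas += [(k, sign) for k in keys for _ in range(turns + 1)]
--         turns += 1
--     out = [dict(cx)]
--     for k, d in deltas[:max_i]: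
--         cx[k] += d
--         out.append(dict(cx))
--     return out
-- ===== Notes on version B (the rewrite author's own statement) =====
-- stated objective: simpler
-- what changed: B replaces A's triply nested while/for/for loop with three scattered break guards by two phases: it precomputes the flat (key, delta) update schedule turn by turn, truncates it to max_i entries, and applies it in one plain pass.
import Mathlib
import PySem

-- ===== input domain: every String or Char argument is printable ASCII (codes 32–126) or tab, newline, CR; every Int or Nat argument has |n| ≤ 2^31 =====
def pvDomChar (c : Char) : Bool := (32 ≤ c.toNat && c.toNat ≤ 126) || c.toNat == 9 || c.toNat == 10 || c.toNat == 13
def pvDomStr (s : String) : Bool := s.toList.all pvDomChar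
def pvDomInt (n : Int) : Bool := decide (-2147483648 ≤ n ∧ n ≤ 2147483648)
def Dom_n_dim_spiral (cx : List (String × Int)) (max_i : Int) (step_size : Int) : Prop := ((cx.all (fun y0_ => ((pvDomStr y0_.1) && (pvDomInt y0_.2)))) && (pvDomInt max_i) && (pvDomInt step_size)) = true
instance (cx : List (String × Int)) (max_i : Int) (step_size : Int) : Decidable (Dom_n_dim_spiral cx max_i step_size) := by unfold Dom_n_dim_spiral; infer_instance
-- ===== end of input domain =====

-- B replaces A's triply nested loop with three break guards by a two-phase pass
-- (precompute the flat (key, delta) schedule, truncate to max_i, apply once); objective: simpler.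
-- Both A and B mutate the argument dict cx in place the same way; the equivalence proved is about the return value.

-- ===== PORT A =====
-- state = (dict, i, start_points)
-- innermost 'for step in range(turns+1)' loop, with its 'if max_i == i: break'
def nds_stepsA (max_i step_size : Int) (turns : Nat) (k : String) :
    Nat → PySem.Dict String Int × Int × List (List (String × Int)) →
          PySem.Dict String Int × Int × List (List (String × Int))
  | 0, s => s
  | n+1, (d, i, acc) =>
      let step := if turns % 2 = 1 then -step_size else step_size
      let d' := d.modify k 0 (· + step)
      let i' := i + 1
      let acc' := acc ++ [d'.items]
      if max_i = i' then (d', i', acc')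
      else nds_stepsA max_i step_size turns k n (d', i', acc')

-- middle 'for k in cx.keys()' loop, with its 'if max_i == i: break'
def nds_keysA (max_i step_size : Int) (turns : Nat) :
    List String → PySem.Dict String Int × Int × List (List (String × Int)) →
          PySem.Dict String Int × Int × List (List (String × Int))
  | [], s => s
  | k :: ks, s =>
      let s' := nds_stepsA max_i step_size turns k (turns + 1) s
      if max_i = s'.2.1 then s' else nds_keysA max_i step_size turns ks s'

-- outer 'while True' loop; fuel only makes the recursion total (Python diverges when it runs out, outside Pre_)
def nds_outerA (max_i step_size : Int) (keys : List String) :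
    Nat → Nat → PySem.Dict String Int × Int × List (List (String × Int)) → List (List (String × Int))
  | 0, _, s => s.2.2
  | f+1, turns, s =>
      let s' := nds_keysA max_i step_size turns keys s
      if max_i = s'.2.1 then s'.2.2 else nds_outerA max_i step_size keys f (turns + 1) s'

def n_dim_spiral (cx : List (String × Int)) (max_i : Int) (step_size : Int) : List (List (String × Int)) :=
  let d0 := PySem.Dict.ofList cx
  nds_outerA max_i step_size d0.keys (max_i.toNat + 1) 0 (d0, 0, [d0.items])

-- ===== PORT B =====
-- '[(k, sign) for k in keys for _ in range(turns+1)]' (the range variable is unused, hence replicate)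
def nds_block (step_size : Int) (keys : List String) (turns : Nat) : List (String × Int) :=
  keys.flatMap (fun k =>
    List.replicate (turns + 1) (k, if turns % 2 = 1 then -step_size else step_size))

-- 'while len(deltas) < max_i: deltas += block; turns += 1'; fuel only makes the recursion total
def nds_build (max_i step_size : Int) (keys : List String) :
    Nat → Nat → List (String × Int) → List (String × Int)
  | 0, _, ds => ds
  | f+1, turns, ds =>
      if (ds.length : Int) < max_i then
        nds_build max_i step_size keys f (turns + 1) (ds ++ nds_block step_size keys turns)
      else ds

-- 'for k, d in deltas[:max_i]: cx[k] += d; out.append(dict(cx))'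
def nds_applyB : List (String × Int) → PySem.Dict String Int → List (List (String × Int)) → List (List (String × Int))
  | [], _, out => out
  | (k, δ) :: rest, d, out =>
      let d' := d.modify k 0 (· + δ)
      nds_applyB rest d' (out ++ [d'.items])

def n_dim_spiral_alt (cx : List (String × Int)) (max_i : Int) (step_size : Int) : List (List (String × Int)) :=
  let d0 := PySem.Dict.ofList cx
  let ds := nds_build max_i step_size d0.keys (max_i.toNat + 1) 0 []
  nds_applyB (PySem.List.slice ds none (some max_i)) d0 [d0.items]

-- ===== PRECONDITION & SPEC =====
-- Pre_ excludes exactly the inputs on which Python A never returns (infinite loop): max_i ≤ 0 with a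
-- nonempty cx, or cx = [] with max_i ≠ 0 (the break condition 'max_i == i' is then never reached).
def Pre_n_dim_spiral (cx : List (String × Int)) (max_i : Int) (step_size : Int) : Prop :=
  (1 ≤ max_i ∧ cx ≠ []) ∨ (max_i = 0 ∧ cx = [])
instance (cx : List (String × Int)) (max_i : Int) (step_size : Int) : Decidable (Pre_n_dim_spiral cx max_i step_size) := by unfold Pre_n_dim_spiral; infer_instance

def pvWitness_n_dim_spiral : (List (String × Int)) × Int × Int := ([("x", 0), ("y", 3)], 5, 1)

def Spec_n_dim_spiral (cx : List (String × Int)) (max_i : Int) (step_size : Int) (out : List (List (String × Int))) : Prop := out = n_dim_spiral_alt cx max_i step_size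
instance (cx : List (String × Int)) (max_i : Int) (step_size : Int) (out : List (List (String × Int))) : Decidable (Spec_n_dim_spiral cx max_i step_size out) := by unfold Spec_n_dim_spiral; infer_instance

-- ===== CLAIM (what is proved, stated in full; the proofs are below) =====
def Claim_equal_n_dim_spiral : Prop := ∀ (cx : List (String × Int)) (max_i : Int) (step_size : Int), Dom_n_dim_spiral cx max_i step_size → Pre_n_dim_spiral cx max_i step_size → Spec_n_dim_spiral cx max_i step_size (n_dim_spiral cx max_i step_size)

-- ===== LEMMAS AND PROOFS =====

-- Proof-side helpers: a generic "apply with break on i = max_i" pass and a breakless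
-- pass that also returns the final dict, so loop results can be composed.

def applyBrk (max_i : Int) : List (String × Int) → PySem.Dict String Int × Int × List (List (String × Int)) →
    PySem.Dict String Int × Int × List (List (String × Int))
  | [], s => s
  | (k, δ) :: ps, (d, i, acc) =>
      let d' := d.modify k 0 (· + δ)
      if max_i = i + 1 then (d', i + 1, acc ++ [d'.items])
      else applyBrk max_i ps (d', i + 1, acc ++ [d'.items])

def applyAll : List (String × Int) → PySem.Dict String Int → List (List (String × Int)) →
    PySem.Dict String Int × List (List (String × Int))
  | [], d, out => (d, out)
  | (k, δ) :: rest, d, out =>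
      let d' := d.modify k 0 (· + δ)
      applyAll rest d' (out ++ [d'.items])

-- the schedule nds_build produces past an already-built prefix of length L
def schedFrom (max_i step_size : Int) (keys : List String) : Nat → Nat → Int → List (String × Int)
  | 0, _, _ => []
  | f+1, turns, L =>
      if L < max_i then
        nds_block step_size keys turns ++
          schedFrom max_i step_size keys f (turns + 1) (L + (nds_block step_size keys turns).length)
      else []

theorem applyB_eq_applyAll (ps : List (String × Int)) (d : PySem.Dict String Int)
    (out : List (List (String × Int))) : nds_applyB ps d out = (applyAll ps d out).2 := by
  induction ps generalizing d out with
  | nil => rfl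
  | cons p ps ih => obtain ⟨k, δ⟩ := p; simpa [nds_applyB, applyAll] using ih ..

theorem applyAll_append (xs ys : List (String × Int)) (d : PySem.Dict String Int)
    (out : List (List (String × Int))) :
    applyAll (xs ++ ys) d out = applyAll ys (applyAll xs d out).1 (applyAll xs d out).2 := by
  induction xs generalizing d out with
  | nil => rfl
  | cons p xs ih => obtain ⟨k, δ⟩ := p; simpa [applyAll] using ih ..

theorem stepsA_eq_applyBrk (max_i step_size : Int) (turns : Nat) (k : String) (n : Nat)
    (s : PySem.Dict String Int × Int × List (List (String × Int))) :
    nds_stepsA max_i step_size turns k n s =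
      applyBrk max_i (List.replicate n (k, if turns % 2 = 1 then -step_size else step_size)) s := by
  induction n generalizing s with
  | zero => rfl
  | succ n ih =>
      obtain ⟨d, i, acc⟩ := s
      simp only [nds_stepsA, List.replicate_succ, applyBrk]
      split
      · rfl
      · exact ih _

theorem applyBrk_append (max_i : Int) (xs ys : List (String × Int))
    (s : PySem.Dict String Int × Int × List (List (String × Int))) (hs : s.2.1 ≠ max_i) :
    applyBrk max_i (xs ++ ys) s =
      (if max_i = (applyBrk max_i xs s).2.1 then applyBrk max_i xs s
       else applyBrk max_i ys (applyBrk max_i xs s)) := by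
  induction xs generalizing s with
  | nil =>
      obtain ⟨d, i, acc⟩ := s
      have hne : ¬ max_i = i := fun h => hs h.symm
      simp [applyBrk, hne]
  | cons p xs ih =>
      obtain ⟨k, δ⟩ := p
      obtain ⟨d, i, acc⟩ := s
      simp only [List.cons_append, applyBrk]
      split
      · next h => simp [← h]
      · next h => exact ih _ (fun hh => h hh.symm)

theorem keysA_eq_applyBrk (max_i step_size : Int) (turns : Nat) (ks : List String)
    (s : PySem.Dict String Int × Int × List (List (String × Int))) (hs : s.2.1 ≠ max_i) :
    nds_keysA max_i step_size turns ks s = applyBrk max_i (nds_block step_size ks turns) s := by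
  induction ks generalizing s with
  | nil => simp [nds_keysA, nds_block, applyBrk]
  | cons k ks ih =>
      have hsteps := stepsA_eq_applyBrk max_i step_size turns k (turns + 1) s
      have happ := applyBrk_append max_i
        (List.replicate (turns + 1) (k, if turns % 2 = 1 then -step_size else step_size))
        (nds_block step_size ks turns) s hs
      simp only [nds_block, List.flatMap_cons] at happ ⊢
      rw [← nds_block] at happ ⊢
      rw [nds_keysA, hsteps, happ]
      by_cases hb : max_i = (applyBrk max_i
          (List.replicate (turns + 1) (k, if turns % 2 = 1 then -step_size else step_size)) s).2.1
      · rw [if_pos hb, if_pos hb]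
      · rw [if_neg hb, if_neg hb]
        exact ih _ (fun hh => hb hh.symm)

theorem applyBrk_break_pos (max_i : Int) (ps : List (String × Int)) (d : PySem.Dict String Int)
    (i : Int) (acc : List (List (String × Int))) (hi : i < max_i) :
    applyBrk max_i ps (d, i, acc) =
      (let t := ps.take (max_i - i).toNat
       ((applyAll t d acc).1, i + t.length, (applyAll t d acc).2)) := by
  induction ps generalizing d i acc with
  | nil => simp [applyBrk, applyAll]
  | cons p ps ih =>
      obtain ⟨k, δ⟩ := p
      have hq : (max_i - i).toNat = (max_i - (i + 1)).toNat + 1 := by omega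
      simp only [applyBrk, hq, List.take_succ_cons]
      split
      · next h =>
          have h0 : (max_i - (i + 1)).toNat = 0 := by omega
          simp [h0, applyAll]
      · next h =>
          have hi' : i + 1 < max_i := by omega
          simp only [ih _ _ _ hi', applyAll, List.length_cons]
          refine Prod.ext rfl (Prod.ext ?_ rfl)
          push_cast
          ring

theorem build_eq_schedFrom (max_i step_size : Int) (keys : List String) (f : Nat) (turns : Nat)
    (ds : List (String × Int)) :
    nds_build max_i step_size keys f turns ds = ds ++ schedFrom max_i step_size keys f turns ds.length := by
  induction f generalizing turns ds with
  | zero => simp [nds_build, schedFrom]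
  | succ f ih =>
      simp only [nds_build, schedFrom]
      split
      · next h => simp [ih, List.append_assoc]
      · simp

theorem outerA_eq_apply_sched (max_i step_size : Int) (keys : List String) (f : Nat)
    (turns : Nat) (d : PySem.Dict String Int) (i : Int) (acc : List (List (String × Int)))
    (hi : i < max_i) :
    nds_outerA max_i step_size keys f turns (d, i, acc) =
      (applyAll ((schedFrom max_i step_size keys f turns i).take (max_i - i).toNat) d acc).2 := by
  induction f generalizing turns d i acc with
  | zero => simp [nds_outerA, schedFrom, applyAll]
  | succ f ih =>
      have hkeys := keysA_eq_applyBrk max_i step_size turns keys (d, i, acc) (by simp; omega)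
      simp only [nds_outerA, hkeys, applyBrk_break_pos max_i _ d i acc hi]
      simp only [schedFrom, if_pos hi]
      by_cases hlen : (max_i - i).toNat ≤ (nds_block step_size keys turns).length
      · rw [List.take_append_of_le_length hlen]
        have ht : ((nds_block step_size keys turns).take (max_i - i).toNat).length
            = (max_i - i).toNat := by rw [List.length_take]; omega
        rw [if_pos (by rw [ht]; omega)]
      · have htake : (nds_block step_size keys turns).take (max_i - i).toNat
            = nds_block step_size keys turns := List.take_of_length_le (by omega)
        rw [htake,
          if_neg (show ¬ max_i = i + ((nds_block step_size keys turns).length : Int) by omega),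
          ih (turns + 1) _ _ _ (by omega)]
        have harith : (max_i - (i + ((nds_block step_size keys turns).length : Int))).toNat
            = (max_i - i).toNat - (nds_block step_size keys turns).length := by omega
        rw [harith, List.take_append, applyAll_append, htake]

-- ===== VERDICT (by name: the statement is the Claim_ definition above) =====
theorem n_dim_spiral_spec : Claim_equal_n_dim_spiral := by
  intro cx max_i step_size _ hpre
  obtain ⟨hmi, -⟩ | ⟨hmi, hcx⟩ := hpre
  case inr =>
    -- cx = [] and max_i = 0: A breaks at once; B builds an empty schedule
    subst hmi hcx
    rfl
  unfold Spec_n_dim_spiral n_dim_spiral n_dim_spiral_alt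
  dsimp only
  rw [outerA_eq_apply_sched _ _ _ _ _ _ _ _ (by omega), build_eq_schedFrom, applyB_eq_applyAll]
  simp only [List.nil_append, List.length_nil, Nat.cast_zero, Int.sub_zero]
  rw [PySem.List.slice_to _ (by omega)]
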